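-- pv_equiv track=rewrite | github.com/kmcrage/adventofcode | 2021/2021-12-08.py | analyze_signals
-- ===== SOURCE A (Python) =====
-- def analyze_signals(signals):
--     """Break up the digit input into a set of frequency stats."""
--     statistics = {}
--     for signal in signals:
--         for s in list(signal):
--             if s not in statistics:
--                 statistics[s] = {}
--             if len(signal) not in statistics[s]:
--                 statistics[s][len(signal)] = 0
--             statistics[s][len(signal)] += 1
--     return statistics
-- ===== SOURCE B (Python) =====
-- def analyze_signals(signals):
--     """Break up the digit input into a set of frequency stats."""
--     pairs = [(ch, len(sg)) for sg in signals for ch in sg]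
--     chars = list(dict.fromkeys(ch for ch, _ in pairs))
--     result = {}
--     for c in chars:
--         lengths = [l for c2, l in pairs if c2 == c]
--         inner = {}
--         for l in lengths:
--             inner[l] = inner.get(l, 0) + 1
--         result[c] = inner
--     return result
-- ===== Notes on version B (the rewrite author's own statement) =====
-- stated objective: alternative
-- what changed: B replaces A's single nested loop that grows a nested dict per character with a group-by decomposition: build the flat (char, len) pair list, dedup the chars in first-appearance order, then build each char's length-frequency table in its own counting pass.
import Mathlib
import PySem

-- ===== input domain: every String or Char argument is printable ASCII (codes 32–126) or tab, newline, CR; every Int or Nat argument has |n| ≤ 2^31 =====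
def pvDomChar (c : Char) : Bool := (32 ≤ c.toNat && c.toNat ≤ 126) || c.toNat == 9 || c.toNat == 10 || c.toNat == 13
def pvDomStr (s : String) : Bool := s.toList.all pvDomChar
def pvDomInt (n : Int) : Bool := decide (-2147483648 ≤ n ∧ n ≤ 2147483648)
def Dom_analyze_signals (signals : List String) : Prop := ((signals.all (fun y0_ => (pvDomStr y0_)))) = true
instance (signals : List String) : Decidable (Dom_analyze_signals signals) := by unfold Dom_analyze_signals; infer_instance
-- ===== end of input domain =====

-- B rebuilds A's nested char→length→count table by a group-by decomposition (flat pair list, ordered dedup of the chars,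
-- then one per-char counting pass) instead of A's incrementally grown nested dict; objective: alternative (same cost).

-- ===== PORT A =====
-- A's inner loop body for one character s of a signal of length L (the three statistics updates, step for step).
def pvStepA (st : PySem.Dict String (PySem.Dict Int Int)) (s : String) (L : Int) :
    PySem.Dict String (PySem.Dict Int Int) :=
  -- if s not in statistics: statistics[s] = {}
  let st1 := if st.contains s then st else st.insert s PySem.Dict.empty
  -- if len(signal) not in statistics[s]: statistics[s][len(signal)] = 0
  let inner := st1.getD s PySem.Dict.empty
  let st2 := if inner.contains L then st1 else st1.insert s (inner.insert L 0)
  -- statistics[s][len(signal)] += 1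
  let inner2 := st2.getD s PySem.Dict.empty
  st2.insert s (inner2.insert L (inner2.getD L 0 + 1))

def analyze_signals (signals : List String) : List (String × List (Int × Int)) :=
  let statistics : PySem.Dict String (PySem.Dict Int Int) :=
    signals.foldl (fun st signal =>
      signal.toList.foldl (fun st ch =>
        pvStepA st (String.ofList [ch]) (signal.toList.length : Int)) st)
      PySem.Dict.empty
  statistics.items.map (fun p => (p.1, p.2.items))

-- ===== PORT B =====
-- pairs = [(ch, len(signal)) for signal in signals for ch in signal]
def pvPairs (signals : List String) : List (String × Int) :=
  signals.flatMap (fun signal =>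
    signal.toList.map (fun ch => (String.ofList [ch], (signal.toList.length : Int))))

def analyze_signals_alt (signals : List String) : List (String × List (Int × Int)) :=
  let pairs := pvPairs signals
  -- chars = list(dict.fromkeys(ch for ch, _ in pairs))
  let chars := PySem.List.dedup (pairs.map Prod.fst)
  let result : PySem.Dict String (PySem.Dict Int Int) :=
    chars.foldl (fun r c =>
      -- lengths = [l for c2, l in pairs if c2 == c]
      let lengths := (pairs.filter (fun p => p.1 == c)).map Prod.snd
      -- for l in lengths: inner[l] = inner.get(l, 0) + 1
      let inner := lengths.foldl (fun d l => d.insert l (d.getD l 0 + 1)) PySem.Dict.empty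
      r.insert c inner) PySem.Dict.empty
  result.items.map (fun p => (p.1, p.2.items))

-- ===== PRECONDITION & SPEC =====
def Spec_analyze_signals (signals : List String) (out : List (String × List (Int × Int))) : Prop := out = analyze_signals_alt signals
instance (signals : List String) (out : List (String × List (Int × Int))) : Decidable (Spec_analyze_signals signals out) := by unfold Spec_analyze_signals; infer_instance

-- ===== CLAIM (what is proved, stated in full; the proofs are below) =====
def Claim_equal_analyze_signals : Prop := ∀ (signals : List String), Dom_analyze_signals signals → Spec_analyze_signals signals (analyze_signals signals)

-- ===== LEMMAS AND PROOFS =====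

-- per-char length-frequency table of a pair stream cs
def pvF (cs : List (String × Int)) (c : String) : PySem.Dict Int Int :=
  PySem.Dict.counter ((cs.filter (fun p => p.1 == c)).map Prod.snd)

-- A's nested loops are the fold of pvStepA over the flat pair stream
lemma A_fold_pairs (signals : List String) (st : PySem.Dict String (PySem.Dict Int Int)) :
    signals.foldl (fun st signal =>
      signal.toList.foldl (fun st ch =>
        pvStepA st (String.ofList [ch]) (signal.toList.length : Int)) st) st
    = (pvPairs signals).foldl (fun st p => pvStepA st p.1 p.2) st := by
  induction signals generalizing st with
  | nil => rfl
  | cons sg rest ih =>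
      simp only [List.foldl_cons, pvPairs, List.flatMap_cons, List.foldl_append, List.foldl_map]
      rw [ih]
      rfl

-- A's step written as one nested-counter update
lemma pvStepA_eq (st : PySem.Dict String (PySem.Dict Int Int)) (c : String) (l : Int) :
    pvStepA st c l
      = st.insert c ((st.getD c PySem.Dict.empty).insert l
          ((st.getD c PySem.Dict.empty).getD l 0 + 1)) := by
  unfold pvStepA
  by_cases hc : st.contains c = true
  · simp only [hc, if_true]
    by_cases hl : ((st.getD c PySem.Dict.empty).contains l) = true
    · simp [hl]
    · simp only [Bool.not_eq_true] at hl
      simp [hl, PySem.Dict.getD_insert_self, PySem.Dict.insert_insert_self,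
        PySem.Dict.getD_of_not_contains _ _ hl]
  · simp only [Bool.not_eq_true] at hc
    simp [hc, PySem.Dict.getD_insert_self, PySem.Dict.insert_insert_self,
      PySem.Dict.getD_of_not_contains _ _ hc, PySem.Dict.contains_empty, PySem.Dict.getD_empty]

lemma counter_snoc (ls : List Int) (l : Int) :
    PySem.Dict.counter (ls ++ [l]) = (PySem.Dict.counter ls).insert l ((PySem.Dict.counter ls).getD l 0 + 1) := by
  rw [← PySem.Dict.foldl_insert_getD_add_one_eq_counter, ← PySem.Dict.foldl_insert_getD_add_one_eq_counter, List.foldl_append]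
  rfl

lemma pvF_snoc_self (cs : List (String × Int)) (c : String) (l : Int) :
    pvF (cs ++ [(c, l)]) c = (pvF cs c).insert l ((pvF cs c).getD l 0 + 1) := by
  simp only [pvF, List.filter_append, List.map_append]
  rw [show List.filter (fun p => p.1 == c) [(c, l)] = [(c, l)] by simp]
  simpa using counter_snoc _ l

lemma pvF_snoc_ne (cs : List (String × Int)) (c c' : String) (l : Int) (h : c' ≠ c) :
    pvF (cs ++ [(c, l)]) c' = pvF cs c' := by
  simp only [pvF, List.filter_append]
  rw [show List.filter (fun p => p.1 == c') [(c, l)] = [] by simp [Ne.symm h]]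
  simp

-- main characterization of the fold of pvStepA: distinct chars in first-appearance order, per-char counters
lemma fold_step_eq (cs : List (String × Int)) :
    cs.foldl (fun st p => pvStepA st p.1 p.2) PySem.Dict.empty
      = PySem.Dict.mk ((PySem.Set.ofList (cs.map Prod.fst)).map (fun c => (c, pvF cs c))) := by
  induction cs using List.reverseRecOn with
  | nil => rfl
  | append_singleton cs p ih =>
      obtain ⟨c, l⟩ := p
      rw [List.foldl_append, List.foldl_cons, List.foldl_nil, ih]
      show pvStepA _ c l = _
      rw [pvStepA_eq]
      have hofl : PySem.Set.ofList ((cs ++ [(c, l)]).map Prod.fst)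
          = PySem.Set.add (PySem.Set.ofList (cs.map Prod.fst)) c := by
        simp [PySem.Set.ofList_eq_foldl, List.foldl_append]
      set chars := PySem.Set.ofList (cs.map Prod.fst) with hchars
      have hnd : chars.Nodup := PySem.Set.nodup_ofList _
      have hkeys : (PySem.Dict.mk (chars.map (fun c => (c, pvF cs c)))).keys = chars := by
        show (chars.map (fun c => (c, pvF cs c))).map Prod.fst = chars
        simp [Function.comp_def]
      by_cases hc : c ∈ chars
      · -- a char already seen: its entry is updated in place
        have hcont : (PySem.Dict.mk (chars.map (fun c => (c, pvF cs c)))).contains c = true := by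
          rw [PySem.Dict.contains_iff_mem_keys, hkeys]; exact hc
        have hget : (PySem.Dict.mk (chars.map (fun c => (c, pvF cs c)))).getD c PySem.Dict.empty = pvF cs c := by
          apply PySem.Dict.getD_of_mem_items
          · exact List.mem_map_of_mem hc
          · rw [hkeys]; exact hnd
        have hadd : PySem.Set.add chars c = chars := by simp [PySem.Set.add, hc]
        rw [hget, ← pvF_snoc_self cs c l]
        apply PySem.Dict.ext
        rw [PySem.Dict.items_insert_of_contains _ _ hcont, hofl, hadd]
        show (chars.map (fun c => (c, pvF cs c))).map _ = chars.map _
        rw [List.map_map]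
        apply List.map_congr_left
        intro c' hc'
        simp only [Function.comp_def]
        by_cases hcc : c' = c
        · rw [if_pos (by simp [hcc]), hcc]
        · rw [if_neg (by simp [hcc]), pvF_snoc_ne _ _ _ _ hcc]
      · -- a fresh char: a new entry is appended
        have hcont : (PySem.Dict.mk (chars.map (fun c => (c, pvF cs c)))).contains c = false := by
          rw [← Bool.not_eq_true, PySem.Dict.contains_iff_mem_keys, hkeys]; exact hc
        have hget : (PySem.Dict.mk (chars.map (fun c => (c, pvF cs c)))).getD c PySem.Dict.empty = PySem.Dict.empty :=
          PySem.Dict.getD_of_not_contains _ _ hcont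
        have hadd : PySem.Set.add chars c = chars ++ [c] := by simp [PySem.Set.add, hc]
        have hfresh : pvF (cs ++ [(c, l)]) c = (PySem.Dict.empty : PySem.Dict Int Int).insert l ((PySem.Dict.empty : PySem.Dict Int Int).getD l 0 + 1) := by
          have hnil : cs.filter (fun p => p.1 == c) = [] := by
            rw [List.filter_eq_nil_iff]
            intro p hp
            simp only [beq_iff_eq]
            intro hpe
            exact hc (by rw [hchars, PySem.Set.mem_ofList]; exact hpe ▸ List.mem_map_of_mem hp)
          have : pvF cs c = PySem.Dict.counter [] := by rw [pvF, hnil]; rfl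
          rw [pvF_snoc_self, this]; rfl
        apply PySem.Dict.ext
        rw [PySem.Dict.items_insert_of_not_contains _ _ hcont, hofl, hadd, hget]
        show (chars.map (fun c => (c, pvF cs c))) ++ _ = ((chars ++ [c]).map _)
        rw [List.map_append]
        congr 1
        · apply List.map_congr_left
          intro c' hc'
          have : c' ≠ c := fun h => hc (h ▸ hc')
          rw [pvF_snoc_ne _ _ _ _ this]
        · simp [hfresh]

-- dict.fromkeys-style ordered dedup is exactly set-of-list first-occurrence order
lemma dedup_eq_ofList (xs : List String) : PySem.List.dedup xs = PySem.Set.ofList xs := rfl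

-- ===== VERDICT (by name: the statement is the Claim_ definition above) =====
theorem analyze_signals_spec : Claim_equal_analyze_signals := by
  intro signals _
  show analyze_signals signals = analyze_signals_alt signals
  unfold analyze_signals analyze_signals_alt
  dsimp only
  rw [A_fold_pairs, fold_step_eq, dedup_eq_ofList]
  simp only [PySem.Dict.foldl_insert_getD_add_one_eq_counter]
  rw [PySem.Dict.items_foldl_insert_fresh
        (PySem.Set.ofList ((pvPairs signals).map Prod.fst)) (fun c => c)
        (fun c => PySem.Dict.counter (((pvPairs signals).filter (fun p => p.1 == c)).map Prod.snd))
        PySem.Dict.empty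
        (fun a _ => PySem.Dict.contains_empty a)
        (by simp [PySem.Set.nodup_ofList])]
  simp [pvF, PySem.Dict.empty]
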